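-- pv_equiv track=rewrite | github.com/MasterVVK/ppee-vector-service | app/semantic_chunker/chunker.py | _merge_page_chunks
-- ===== SOURCE A (Python) =====
-- from typing import List, Dict, Any, Optional, Tuple
--
-- def _merge_page_chunks(chunks: List[Dict]) -> Dict:
--     """
--     Объединяет чанки с одной страницы
--     """
--     if not chunks:
--         return {}
--
--     if len(chunks) == 1:
--         return chunks[0]
--
--     # Берем базовую информацию из первого чанка
--     merged_chunk = {
--         "content": "",
--         "type": "merged_page",
--         "page": chunks[0].get("page"),
--         "heading": None,
--         "table_id": None
--     }
--
--     sections = []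
--     current_section = None
--
--     for chunk in chunks:
--         # Если это заголовок, начинаем новую секцию
--         if chunk["type"] == "heading":
--             if current_section:
--                 sections.append(current_section)
--             current_section = {
--                 "heading": chunk["content"],
--                 "content": []
--             }
--
--         # Если уже есть секция, добавляем контент
--         elif current_section:
--             current_section["content"].append(chunk["content"])
--
--         # Иначе добавляем как отдельный контент
--         else:
--             if chunk["content"].strip():
--                 sections.append({
--                     "heading": None,
--                     "content": [chunk["content"]]
--                 })
--
--     # Добавляем последнюю секцию
--     if current_section:
--         sections.append(current_section)
--
--     # Объединяем все секции
--     content_parts = []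
--     for section in sections:
--         if section["heading"]:
--             content_parts.append(f"## {section['heading']}")
--         content_parts.extend(section["content"])
--
--     merged_chunk["content"] = "\n\n".join(content_parts)
--
--     return merged_chunk
-- ===== SOURCE B (Python) =====
-- from typing import List, Dict, Any, Optional, Tuple
--
-- def _merge_page_chunks(chunks: List[Dict]) -> Dict:
--     """Single-pass rewrite: no intermediate sections buffer, content parts
--     are emitted directly while scanning, guided by an in_section flag."""
--     if not chunks:
--         return {}
--     if len(chunks) == 1:
--         return chunks[0]
--
--     parts = []
--     in_section = False
--     for chunk in chunks:
--         if chunk["type"] == "heading":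
--             if chunk["content"]:
--                 parts.append("## " + chunk["content"])
--             in_section = True
--         elif in_section:
--             parts.append(chunk["content"])
--         elif chunk["content"].strip():
--             parts.append(chunk["content"])
--
--     return {
--         "content": "\n\n".join(parts),
--         "type": "merged_page",
--         "page": chunks[0].get("page"),
--         "heading": None,
--         "table_id": None,
--     }
-- ===== Notes on version B (the rewrite author's own statement) =====
-- stated objective: simpler
-- what changed: Replaced A's two-phase design (build a list of section records with a buffered current_section, then a second loop rendering sections into content_parts) by a single pass that emits each content part directly while scanning, tracking only an in_section boolean.
import Mathlib
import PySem

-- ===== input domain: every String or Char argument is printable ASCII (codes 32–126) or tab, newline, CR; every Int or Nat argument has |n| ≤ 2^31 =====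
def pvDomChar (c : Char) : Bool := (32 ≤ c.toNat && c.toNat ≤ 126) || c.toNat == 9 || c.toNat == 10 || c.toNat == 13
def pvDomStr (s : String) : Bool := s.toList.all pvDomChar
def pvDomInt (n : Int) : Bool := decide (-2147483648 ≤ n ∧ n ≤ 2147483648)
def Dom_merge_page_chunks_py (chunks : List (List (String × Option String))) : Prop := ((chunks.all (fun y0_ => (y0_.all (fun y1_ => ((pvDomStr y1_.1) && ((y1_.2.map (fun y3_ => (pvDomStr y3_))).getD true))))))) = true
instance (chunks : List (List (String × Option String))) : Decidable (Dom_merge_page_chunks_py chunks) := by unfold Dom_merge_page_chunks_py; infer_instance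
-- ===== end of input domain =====

-- B fuses A's two loops (sections buffer + rendering pass) into one direct pass with an in_section flag; objective: simpler.


-- ===== PORT A =====
-- a "section" dict {"heading": …, "content": [...]} is modelled as the pair (heading, contents)
abbrev pvSection : Type := Option String × List String

-- the `f"## {heading}"`/extend rendering of one section (`if section["heading"]:` = nonempty string)
def pvRenderSec (s : pvSection) : List String :=
  (match s.1 with
   | some h => if h ≠ "" then ["## " ++ h] else []
   | none => []) ++ s.2

-- body of A's first loop: state = (sections, current_section)
def pvStepA (st : List pvSection × Option pvSection) (chunk : List (String × Option String)) :
    List pvSection × Option pvSection :=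
  let d : PySem.Dict String (Option String) := PySem.Dict.mk chunk
  if d.get? "type" = some (some "heading") then
    ((match st.2 with | some cur => st.1 ++ [cur] | none => st.1), some (d.getD "content" none, []))
  else
    match st.2 with
    | some cur => (st.1, some (cur.1, cur.2 ++ [(d.getD "content" none).getD ""]))
    | none =>
        if PySem.Str.strip ((d.getD "content" none).getD "") ≠ "" then
          (st.1 ++ [(none, [(d.getD "content" none).getD ""])], none)
        else st

def merge_page_chunks_py (chunks : List (List (String × Option String))) : List (String × Option String) :=
  match chunks with
  | [] => []
  | [c] => c
  | c0 :: _ =>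
    let merged : PySem.Dict String (Option String) :=
      PySem.Dict.mk [("content", some ""), ("type", some "merged_page"),
                     ("page", (PySem.Dict.mk c0).getD "page" none),
                     ("heading", none), ("table_id", none)]
    let st := chunks.foldl pvStepA ([], none)
    let sections := st.1 ++ (match st.2 with | some cur => [cur] | none => [])
    let content_parts := sections.foldl (fun parts s => parts ++ pvRenderSec s) []
    (merged.insert "content" (some (PySem.Str.join "\n\n" content_parts))).items

-- ===== PORT B =====
-- body of B's single loop: state = (content parts emitted so far, in_section flag)
def pvStepB (st : List String × Bool) (chunk : List (String × Option String)) :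
    List String × Bool :=
  let d : PySem.Dict String (Option String) := PySem.Dict.mk chunk
  if d.get? "type" = some (some "heading") then
    ((match d.getD "content" none with
      | some s => if s ≠ "" then st.1 ++ ["## " ++ s] else st.1
      | none => st.1), true)
  else if st.2 then (st.1 ++ [(d.getD "content" none).getD ""], true)
  else if PySem.Str.strip ((d.getD "content" none).getD "") ≠ "" then
    (st.1 ++ [(d.getD "content" none).getD ""], false)
  else st

def merge_page_chunks_py_alt (chunks : List (List (String × Option String))) : List (String × Option String) :=
  if chunks.isEmpty then []
  else if chunks.length = 1 then chunks.headI
  else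
    let parts := (chunks.foldl pvStepB ([], false)).1
    [("content", some (PySem.Str.join "\n\n" parts)),
     ("type", some "merged_page"),
     ("page", (PySem.Dict.mk chunks.headI).getD "page" none),
     ("heading", none), ("table_id", none)]

-- ===== PRECONDITION & SPEC =====
-- Pre_ excludes exactly the inputs where A raises: with ≥ 2 chunks, a chunk missing the "type" or
-- "content" key (KeyError) or a non-heading chunk whose "content" is None (AttributeError on .strip()
-- or TypeError in "\n\n".join).
def Pre_merge_page_chunks_py (chunks : List (List (String × Option String))) : Prop :=
  chunks.length ≤ 1 ∨
  ∀ c ∈ chunks,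
    (PySem.Dict.mk c).contains "type" = true ∧
    (PySem.Dict.mk c).contains "content" = true ∧
    ((PySem.Dict.mk c).get? "type" = some (some "heading") ∨
     ((PySem.Dict.mk c).getD "content" none).isSome = true)
instance (chunks : List (List (String × Option String))) : Decidable (Pre_merge_page_chunks_py chunks) := by
  unfold Pre_merge_page_chunks_py; infer_instance

def pvWitness_merge_page_chunks_py : (List (List (String × Option String))) :=
  [[("type", some "heading"), ("content", some "Title")],
   [("type", some "text"), ("content", some "body"), ("page", some "3")]]

def Spec_merge_page_chunks_py (chunks : List (List (String × Option String))) (out : List (String × Option String)) : Prop := out = merge_page_chunks_py_alt chunks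
instance (chunks : List (List (String × Option String))) (out : List (String × Option String)) : Decidable (Spec_merge_page_chunks_py chunks out) := by unfold Spec_merge_page_chunks_py; infer_instance

-- ===== CLAIM (what is proved, stated in full; the proofs are below) =====
def Claim_equal_merge_page_chunks_py : Prop := ∀ (chunks : List (List (String × Option String))), Dom_merge_page_chunks_py chunks → Pre_merge_page_chunks_py chunks → Spec_merge_page_chunks_py chunks (merge_page_chunks_py chunks)

-- ===== LEMMAS AND PROOFS =====

-- rendering A's pending current_section (none renders to nothing)
def pvRenderCur : Option pvSection → List String
  | some c => pvRenderSec c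
  | none => []

-- core invariant: B's running parts list is the rendering of A's (sections, current_section) state
theorem pv_step (secs : List pvSection) (cur : Option pvSection)
    (c : List (String × Option String)) :
    pvStepB (secs.flatMap pvRenderSec ++ pvRenderCur cur, cur.isSome) c
      = ((pvStepA (secs, cur) c).1.flatMap pvRenderSec
          ++ pvRenderCur (pvStepA (secs, cur) c).2,
         (pvStepA (secs, cur) c).2.isSome) := by
  unfold pvStepA pvStepB
  by_cases hh : (PySem.Dict.mk c).get? "type" = some (some "heading")
  · simp only [hh, if_true]
    cases cur with
    | none =>
        cases hc : (PySem.Dict.mk c).getD "content" none with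
        | none => simp [pvRenderCur, pvRenderSec]
        | some s =>
            by_cases hs : s = ""
            · simp [pvRenderCur, pvRenderSec, hs]
            · simp [pvRenderCur, pvRenderSec, hs]
    | some cur =>
        cases hc : (PySem.Dict.mk c).getD "content" none with
        | none => simp [pvRenderCur, pvRenderSec]
        | some s =>
            by_cases hs : s = ""
            · simp [pvRenderCur, pvRenderSec, hs]
            · simp [pvRenderCur, pvRenderSec, hs]
  · simp only [hh, if_false]
    cases cur with
    | some cur =>
        simp [pvRenderCur, pvRenderSec, List.append_assoc]
    | none =>
        by_cases hs : PySem.Str.strip (((PySem.Dict.mk c).getD "content" none).getD "") ≠ ""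
        · simp [pvRenderCur, pvRenderSec, hs]
        · simp [pvRenderCur, hs]

theorem pv_loop_inv (cs : List (List (String × Option String)))
    (secs : List pvSection) (cur : Option pvSection) :
    cs.foldl pvStepB (secs.flatMap pvRenderSec ++ pvRenderCur cur, cur.isSome)
      = ((cs.foldl pvStepA (secs, cur)).1.flatMap pvRenderSec
          ++ pvRenderCur (cs.foldl pvStepA (secs, cur)).2,
         (cs.foldl pvStepA (secs, cur)).2.isSome) := by
  induction cs generalizing secs cur with
  | nil => rfl
  | cons c cs ih =>
    simp only [List.foldl_cons, pv_step]
    exact ih (pvStepA (secs, cur) c).1 (pvStepA (secs, cur) c).2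

-- ===== VERDICT (by name: the statement is the Claim_ definition above) =====
theorem merge_page_chunks_py_spec : Claim_equal_merge_page_chunks_py := by
  intro chunks _ _
  unfold Spec_merge_page_chunks_py
  match chunks with
  | [] => rfl
  | [c] => rfl
  | c0 :: c1 :: rest =>
    have hinv := pv_loop_inv (c0 :: c1 :: rest) [] none
    simp only [List.flatMap_nil, List.nil_append, pvRenderCur, Option.isSome_none] at hinv
    simp only [merge_page_chunks_py, merge_page_chunks_py_alt, hinv,
      PySem.List.foldl_append_eq_flatMap, List.nil_append, List.flatMap_append]
    cases hC : ((c0 :: c1 :: rest).foldl pvStepA ([], none)).2 with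
    | none =>
        simp [PySem.Dict.items_insert]
    | some cur =>
        simp [PySem.Dict.items_insert]
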